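-- pv_equiv track=rewrite | github.com/bobcaoge/my-code | python/leetcode/5345_Rank_Teams_by_Votes.py | rankTeams
-- ===== SOURCE A (Python) =====
-- def rankTeams(votes):
--     """
--     :type votes: List[str]
--     :rtype: str
--     """
--     if not votes:
--         return ''
--     teams = {}
--     for vote in votes:
--         for i, name in enumerate(vote):
--             if name not in teams.keys():
--                 teams[name] = [0]*len(vote)
--             teams[name][i] -= 1
--     info = [[v, name] for name, v in teams.items()]
--     info.sort()
--     ret = ''.join([n for _, n in info])
--     return ret
-- ===== SOURCE B (Python) =====
-- def rankTeams(votes):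
--     if not votes:
--         return ''
--     tally = {}
--     for vote in votes:
--         for i, name in enumerate(vote):
--             if name not in tally:
--                 tally[name] = [0] * len(vote)
--             tally[name][i] -= 1
--
--     def ranks_before(a, b):
--         # True iff team a must appear strictly before team b in the ranking
--         va, vb = tally[a], tally[b]
--         for x, y in zip(va, vb):
--             if x != y:
--                 return x < y
--         if len(va) != len(vb):
--             return len(va) < len(vb)
--         return a < b
--
--     ordered = []
--     for name in tally:
--         pos = 0
--         while pos < len(ordered) and ranks_before(ordered[pos], name):
--             pos += 1
--         ordered.insert(pos, name)
--     return ''.join(ordered)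
-- ===== Notes on version B (the rewrite author's own statement) =====
-- stated objective: alternative
-- what changed: B keeps the vote-counting loop but drops A's materialised [vector, name] pair list and list.sort, instead ordering the team names directly with a comparator-driven insertion sort (first differing tally entry, then vector length, then name).
import Mathlib
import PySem

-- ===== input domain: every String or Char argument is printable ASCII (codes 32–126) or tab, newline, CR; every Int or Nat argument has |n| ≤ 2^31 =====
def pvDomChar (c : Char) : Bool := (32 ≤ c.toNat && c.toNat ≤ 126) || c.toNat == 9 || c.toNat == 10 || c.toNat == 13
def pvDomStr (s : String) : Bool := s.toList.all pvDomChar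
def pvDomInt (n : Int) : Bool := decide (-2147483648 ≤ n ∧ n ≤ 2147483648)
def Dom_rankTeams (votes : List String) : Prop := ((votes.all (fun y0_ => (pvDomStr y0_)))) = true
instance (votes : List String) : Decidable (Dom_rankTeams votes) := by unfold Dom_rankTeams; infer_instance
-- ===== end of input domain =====

-- B replaces A's materialised [vector, name] pairs + list.sort by a comparator-driven insertion
-- sort of the team names (objective: alternative decomposition, same counting loop).

-- ===== PORT A =====
-- the counting loop: for each vote, for i, name in enumerate(vote): create [0]*len(vote) on first
-- sight of name, then teams[name][i] -= 1.  'teams[name][i] -= 1' is ported with List.set /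
-- List.getD at the Nat index i.toNat: exact on Pre_ (enumerate indices are ≥ 0, and Pre_ holds
-- exactly when every index is inside the stored vector, i.e. where Python does not raise IndexError).
def pvTally (votes : List String) : PySem.Dict Char (List Int) :=
  votes.foldl
    (fun d vote =>
      (PySem.List.enumerate vote.toList).foldl
        (fun d p =>
          let d' := if d.contains p.2 then d else d.insert p.2 (List.replicate vote.toList.length 0)
          d'.modify p.2 [] (fun v => v.set p.1.toNat (v.getD p.1.toNat 0 - 1)))
        d)
    PySem.Dict.empty

def rankTeams (votes : List String) : String :=
  if votes = [] then "" else
    let teams := pvTally votes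
    let info := teams.items.map (fun p => (p.2, p.1))
    -- info.sort() on two-element [vector, name] lists is Python's lexicographic tuple order
    String.ofList ((PySem.List.sorted2 info (fun q => q.1) (fun q => q.2)).map (fun q => q.2))

-- ===== PORT B =====
-- B keeps A's counting loop verbatim, so both ports share the helper pvTally above.
-- the 'for x, y in zip(va, vb): if x != y: return x < y' loop of ranks_before
def pvScanB : List (Int × Int) → Option Bool
  | [] => none
  | (x, y) :: rest => if x ≠ y then some (decide (x < y)) else pvScanB rest

-- ranks_before(a, b): first differing tally entry, then vector length, then the name
def pvRanksBefore (va vb : List Int) (a b : Char) : Bool :=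
  match pvScanB (va.zip vb) with
  | some r => r
  | none =>
      if va.length ≠ vb.length then decide (va.length < vb.length) else decide (a < b)

-- the 'pos = 0; while pos < len(ordered) and ranks_before(ordered[pos], name): pos += 1;
-- ordered.insert(pos, name)' inner loop
def pvInsertRanked (rb : Char → Char → Bool) (x : Char) : List Char → List Char
  | [] => [x]
  | y :: ys => if rb y x then y :: pvInsertRanked rb x ys else x :: y :: ys

def rankTeams_alt (votes : List String) : String :=
  if votes = [] then "" else
    let tally := pvTally votes
    let rb := fun a b => pvRanksBefore (tally.getD a []) (tally.getD b []) a b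
    String.ofList (tally.keys.foldl (fun acc n => pvInsertRanked rb n acc) [])

-- ===== PRECONDITION & SPEC =====
-- Pre_ excludes exactly the inputs on which A raises IndexError: an occurrence of a character at an
-- index i that is not smaller than the length of the first vote containing that character (the
-- length of the tally vector A allocated for it).
def Pre_rankTeams (votes : List String) : Prop :=
  (votes.all (fun v =>
    (List.range v.toList.length).all (fun i =>
      ((votes.find? (fun w => w.toList.contains (v.toList.getD i ' '))).all
        (fun w => decide (i < w.toList.length)))))) = true
instance (votes : List String) : Decidable (Pre_rankTeams votes) := by unfold Pre_rankTeams; infer_instance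

def pvWitness_rankTeams : List String := ["ABC", "ACB", "ABC"]

def Spec_rankTeams (votes : List String) (out : String) : Prop := out = rankTeams_alt votes
instance (votes : List String) (out : String) : Decidable (Spec_rankTeams votes out) := by unfold Spec_rankTeams; infer_instance

-- ===== CLAIM (what is proved, stated in full; the proofs are below) =====
def Claim_equal_rankTeams : Prop := ∀ (votes : List String), Dom_rankTeams votes → Pre_rankTeams votes → Spec_rankTeams votes (rankTeams votes)

-- ===== LEMMAS AND PROOFS =====

-- ranks_before computes the lexicographic comparison of the two vectors, then the names
theorem pvRanksBefore_eq (va vb : List Int) (a b : Char) :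
    pvRanksBefore va vb a b
      = (decide (va < vb) || (!decide (vb < va) && decide (a < b))) := by
  induction va generalizing vb with
  | nil =>
      cases vb with
      | nil => simp [pvRanksBefore, pvScanB]
      | cons y ys => simp [pvRanksBefore, pvScanB, List.nil_lt_cons, List.not_lt_nil]
  | cons x xs ih =>
      cases vb with
      | nil => simp [pvRanksBefore, pvScanB, List.nil_lt_cons]
      | cons y ys =>
          by_cases hxy : x = y
          · subst hxy
            have : pvRanksBefore (x :: xs) (x :: ys) a b = pvRanksBefore xs ys a b := by
              simp [pvRanksBefore, pvScanB]
            rw [this, ih]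
            simp
          · rcases lt_trichotomy x y with h | h | h
            · simp [pvRanksBefore, pvScanB, hxy, h, List.cons_lt_cons_iff, not_lt_of_gt]
            · exact absurd h hxy
            · simp [pvRanksBefore, pvScanB, hxy, h, List.cons_lt_cons_iff, not_lt_of_gt,
                (Ne.symm hxy)]

-- the pair comparison used by A's sort is the negation of B's ranks_before with swapped arguments
theorem ltA_eq_not_rb (g : Char → List Int) {a b : Char} (h : a ≠ b) :
    (decide (g a < g b) || (!decide (g b < g a) && decide (a < b)))
      = !(pvRanksBefore (g b) (g a) b a) := by
  rw [pvRanksBefore_eq]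
  by_cases hP : g a < g b
  · have hQ : ¬ g b < g a := List.lt_asymm hP
    simp [hP, hQ]
  · by_cases hQ : g b < g a
    · simp [hP, hQ]
    · rcases lt_or_gt_of_ne h with hab | hab
      · simp [hP, hQ, hab, not_lt_of_gt hab]
      · simp [hP, hQ, hab, not_lt_of_gt hab]

theorem pvInsertRanked_perm (rb : Char → Char → Bool) (x : Char) (l : List Char) :
    (pvInsertRanked rb x l).Perm (x :: l) := by
  induction l with
  | nil => simp [pvInsertRanked]
  | cons y ys ih =>
      simp only [pvInsertRanked]
      split
      · exact (ih.cons y).trans (List.Perm.swap x y ys)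
      · exact List.Perm.refl _

-- one insertion step, transported through the map c ↦ (vector, name)
theorem insertBy_bridge (g : Char → List Int) (k : Char) (acc : List Char) (hk : k ∉ acc) :
    PySem.List.insertBy
        (fun p q => decide (p.1 < q.1) || (!decide (q.1 < p.1) && decide (p.2 < q.2)))
        (g k, k) (acc.map (fun c => (g c, c)))
      = (pvInsertRanked (fun a b => pvRanksBefore (g a) (g b) a b) k acc).map
          (fun c => (g c, c)) := by
  induction acc with
  | nil => simp [PySem.List.insertBy, pvInsertRanked]
  | cons y ys ih =>
      have hky : k ≠ y := by intro h; exact hk (h ▸ List.mem_cons_self)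
      have hlt := ltA_eq_not_rb g hky
      simp only [List.map_cons, PySem.List.insertBy, pvInsertRanked]
      rw [hlt]
      by_cases hrb : pvRanksBefore (g y) (g k) y k = true
      · simp [hrb, ih (fun h => hk (List.mem_cons_of_mem _ h))]
      · simp [hrb]

-- the whole sorts, transported through the same map
theorem foldl_bridge (g : Char → List Int) :
    ∀ (ks acc : List Char), (ks ++ acc).Nodup →
      List.foldl
          (fun a x =>
            PySem.List.insertBy
              (fun p q => decide (p.1 < q.1) || (!decide (q.1 < p.1) && decide (p.2 < q.2)))
              x a)
          (acc.map (fun c => (g c, c))) (ks.map (fun c => (g c, c)))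
        = (List.foldl
            (fun a n => pvInsertRanked (fun a b => pvRanksBefore (g a) (g b) a b) n a)
            acc ks).map (fun c => (g c, c)) := by
  intro ks
  induction ks with
  | nil => intro acc _; simp
  | cons k ks ih =>
      intro acc hnd
      have hnd' : (k :: (ks ++ acc)).Nodup := by simpa using hnd
      have hk : k ∉ acc := fun h => (List.nodup_cons.mp hnd').1 (List.mem_append_right _ h)
      simp only [List.map_cons, List.foldl_cons, insertBy_bridge g k acc hk]
      apply ih
      have hperm : (ks ++ pvInsertRanked (fun a b => pvRanksBefore (g a) (g b) a b) k acc).Perm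
          (k :: (ks ++ acc)) :=
        ((pvInsertRanked_perm _ k acc).append_left ks).trans List.perm_middle
      exact hperm.symm.nodup hnd'

-- the keys of the tally dict stay Nodup through the counting loop
theorem nodup_keys_inner (L : Nat) :
    ∀ (l : List (Int × Char)) (d : PySem.Dict Char (List Int)), d.keys.Nodup →
      ((l.foldl
          (fun d p =>
            let d' := if d.contains p.2 then d else d.insert p.2 (List.replicate L 0)
            d'.modify p.2 [] (fun v => v.set p.1.toNat (v.getD p.1.toNat 0 - 1)))
          d).keys).Nodup := by
  intro l
  induction l with
  | nil => intro d hd; simpa using hd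
  | cons p ps ih =>
      intro d hd
      simp only [List.foldl_cons]
      apply ih
      set d' := if d.contains p.2 then d else d.insert p.2 (List.replicate L 0) with hd'
      have hc : d'.contains p.2 = true := by
        rw [hd']; split
        · assumption
        · exact PySem.Dict.contains_insert_self _ _ _
      have hnd' : d'.keys.Nodup := by
        rw [hd']; split
        · exact hd
        · rename_i hcf
          rw [PySem.Dict.keys_insert_of_not_contains _ _ (by simpa using hcf)]
          have hpk : p.2 ∉ d.keys := by
            intro hm
            exact hcf ((PySem.Dict.contains_iff_mem_keys d p.2).mpr hm)
          exact List.Nodup.append hd (by simp) (by simpa [List.disjoint_singleton] using hpk)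
      rw [PySem.Dict.keys_modify, PySem.Dict.keys_insert_of_contains _ _ hc]
      exact hnd'

theorem nodup_keys_pvTally (votes : List String) : (pvTally votes).keys.Nodup := by
  unfold pvTally
  have : ∀ (vs : List String) (d : PySem.Dict Char (List Int)), d.keys.Nodup →
      ((vs.foldl
          (fun d vote =>
            (PySem.List.enumerate vote.toList).foldl
              (fun d p =>
                let d' := if d.contains p.2 then d
                  else d.insert p.2 (List.replicate vote.toList.length 0)
                d'.modify p.2 [] (fun v => v.set p.1.toNat (v.getD p.1.toNat 0 - 1)))
              d)
          d).keys).Nodup := by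
    intro vs
    induction vs with
    | nil => intro d hd; simpa using hd
    | cons v vs ih =>
        intro d hd
        simp only [List.foldl_cons]
        exact ih _ (nodup_keys_inner v.toList.length _ d hd)
  exact this votes _ PySem.Dict.nodup_keys_empty

-- A's [vector, name] pairs are the keys mapped through c ↦ (vector of c, c)
theorem items_swap_eq_keys_map (d : PySem.Dict Char (List Int)) (hn : d.keys.Nodup) :
    d.items.map (fun p => (p.2, p.1)) = d.keys.map (fun c => (d.getD c [], c)) := by
  have hk : d.keys = d.items.map (fun p => p.1) := rfl
  rw [hk, List.map_map]
  apply List.map_congr_left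
  intro p hp
  have hmem : (p.1, p.2) ∈ d.items := by simpa using hp
  have := PySem.Dict.getD_of_mem_items d hmem hn ([] : List Int)
  simp [this]

-- ===== VERDICT (by name: the statement is the Claim_ definition above) =====
theorem rankTeams_spec : Claim_equal_rankTeams := by
  intro votes _ _
  unfold Spec_rankTeams rankTeams rankTeams_alt
  by_cases hv : votes = []
  · simp [hv]
  · simp only [hv, if_false]
    set d := pvTally votes with hd
    have hnd : d.keys.Nodup := nodup_keys_pvTally votes
    have hsorted :
        PySem.List.sorted2 (d.items.map (fun p => (p.2, p.1))) (fun q => q.1) (fun q => q.2)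
          = (List.foldl
              (fun a n =>
                pvInsertRanked
                  (fun a b => pvRanksBefore (d.getD a []) (d.getD b []) a b) n a)
              [] d.keys).map (fun c => (d.getD c [], c)) := by
      rw [items_swap_eq_keys_map d hnd]
      have h0 := foldl_bridge (fun c => d.getD c []) d.keys [] (by simpa using hnd)
      simpa [PySem.List.sorted2] using h0
    rw [hsorted, List.map_map,
      List.map_id'' (f := ((fun q => q.2) ∘ fun c => (d.getD c [], c))) (fun c => rfl)]
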